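-- pv_equiv track=rewrite | github.com/gschramm/parallelproj | python/parallelprojpy/backend.py | calc_chunks
-- ===== SOURCE A (Python) =====
-- def calc_chunks(nLORs: int, num_chunks: int) -> list[int]:
--     """ calculate indices to split an array of length nLORs into num_chunks chunks
--
--         example: splitting an array of length 10 into 3 chunks returns [0,4,7,10]
--     """
--     rem = nLORs % num_chunks
--     div = (nLORs // num_chunks)
--
--     chunks = [0]
--
--     for i in range(num_chunks):
--         if i < rem:
--             nLORs_chunck = div + 1
--         else:
--             nLORs_chunck = div
--
--         chunks.append(chunks[i] + nLORs_chunck)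
--
--     return chunks
-- ===== SOURCE B (Python) =====
-- def calc_chunks(nLORs: int, num_chunks: int) -> list[int]:
--     """calculate indices to split an array of length nLORs into num_chunks chunks"""
--     div = nLORs // num_chunks
--     rem = nLORs % num_chunks
--     return [i * div + min(i, rem) for i in range(num_chunks + 1)]
-- ===== Notes on version B (the rewrite author's own statement) =====
-- stated objective: simpler
-- what changed: Replaces the cumulative loop that appends each boundary from the previous one with a single comprehension computing each boundary in closed form (i*div + min(i, rem)).
-- outside the precondition, e.g. on calc_chunks(10, -3): A returns [0], B returns []; on calc_chunks(10, 0): A raises ZeroDivisionError, B raises ZeroDivisionError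
import Mathlib
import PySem

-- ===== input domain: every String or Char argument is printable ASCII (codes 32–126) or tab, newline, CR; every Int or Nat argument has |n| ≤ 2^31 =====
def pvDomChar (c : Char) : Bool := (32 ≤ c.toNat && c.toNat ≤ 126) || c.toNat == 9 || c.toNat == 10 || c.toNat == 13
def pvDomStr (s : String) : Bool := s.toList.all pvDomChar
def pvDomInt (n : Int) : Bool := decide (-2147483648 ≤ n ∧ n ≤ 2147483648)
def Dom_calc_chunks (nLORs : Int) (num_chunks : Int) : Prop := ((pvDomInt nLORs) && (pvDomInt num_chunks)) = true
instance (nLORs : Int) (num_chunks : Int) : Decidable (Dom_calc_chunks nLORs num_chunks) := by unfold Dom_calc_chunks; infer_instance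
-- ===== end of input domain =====

-- B replaces A's cumulative boundary loop with a closed-form per-index comprehension (simpler).


-- ===== PORT A =====
def calc_chunks (nLORs : Int) (num_chunks : Int) : List Int :=
  let rem := PySem.Int.mod nLORs num_chunks
  let div := PySem.Int.floordiv nLORs num_chunks
  (PySem.List.pyRange 0 num_chunks 1).foldl
    (fun chunks i =>
      let nLORs_chunck := if i < rem then div + 1 else div
      chunks ++ [PySem.List.pyGetD chunks i 0 + nLORs_chunck])
    [0]

-- ===== PORT B =====
def calc_chunks_alt (nLORs : Int) (num_chunks : Int) : List Int :=
  let div := PySem.Int.floordiv nLORs num_chunks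
  let rem := PySem.Int.mod nLORs num_chunks
  (PySem.List.pyRange 0 (num_chunks + 1) 1).map (fun i => i * div + min i rem)

-- ===== PRECONDITION & SPEC =====
-- Pre_ requires num_chunks ≥ 1: num_chunks = 0 makes A raise ZeroDivisionError, and a
-- negative chunk count is outside the natural domain (A there returns the degenerate [0],
-- an accident of its empty loop, while B returns []).
def Pre_calc_chunks (nLORs : Int) (num_chunks : Int) : Prop := 1 ≤ num_chunks
instance (nLORs : Int) (num_chunks : Int) : Decidable (Pre_calc_chunks nLORs num_chunks) := by unfold Pre_calc_chunks; infer_instance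
def pvWitness_calc_chunks : Int × Int := (10, 3)

def Spec_calc_chunks (nLORs : Int) (num_chunks : Int) (out : List Int) : Prop := out = calc_chunks_alt nLORs num_chunks
instance (nLORs : Int) (num_chunks : Int) (out : List Int) : Decidable (Spec_calc_chunks nLORs num_chunks out) := by unfold Spec_calc_chunks; infer_instance

-- ===== CLAIM (what is proved, stated in full; the proofs are below) =====
def Claim_equal_calc_chunks : Prop := ∀ (nLORs : Int) (num_chunks : Int), Dom_calc_chunks nLORs num_chunks → Pre_calc_chunks nLORs num_chunks → Spec_calc_chunks nLORs num_chunks (calc_chunks nLORs num_chunks)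

-- ===== LEMMAS AND PROOFS =====

-- Loop invariant: after iterating over range(0, n), A's chunk list is B's closed-form map up to n.
theorem calc_chunks_loop_inv (div rem : Int) (hrem : 0 ≤ rem) : ∀ (n : Nat),
    (PySem.List.pyRange 0 (n : Int) 1).foldl
      (fun chunks i =>
        let nLORs_chunck := if i < rem then div + 1 else div
        chunks ++ [PySem.List.pyGetD chunks i 0 + nLORs_chunck])
      [0]
    = (PySem.List.pyRange 0 ((n : Int) + 1) 1).map (fun i => i * div + min i rem) := by
  intro n
  induction n with
  | zero =>
    simp only [Nat.cast_zero, zero_add]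
    rw [show PySem.List.pyRange 0 1 = [(0 : Int)] from by decide]
    simp
    omega
  | succ k ih =>
    push_cast
    rw [PySem.List.pyRange_one_succ_right (a := 0) (b := (k : Int)) (by positivity),
        List.foldl_append, ih]
    simp only [List.foldl_cons, List.foldl_nil]
    have hc : ((k : Int) + 1) = ((k + 1 : Nat) : Int) := by push_cast; ring
    rw [hc, PySem.List.pyGetD_map_pyRange (fun i => i * div + min i rem) (k+1) k 0 (by omega),
        ← hc, PySem.List.pyRange_one_succ_right (a := 0) (b := (k : Int) + 1) (by positivity),
        List.map_append]
    simp only [List.map_cons, List.map_nil]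
    congr 1
    split_ifs with h
    · rw [min_eq_left (le_of_lt h), min_eq_left (by omega : (k : Int) + 1 ≤ rem)]; ring_nf
    · rw [min_eq_right (by omega : rem ≤ (k : Int)), min_eq_right (by omega : rem ≤ (k : Int) + 1)]; ring_nf

theorem calc_chunks_spec : Claim_equal_calc_chunks := by
  intro nLORs num_chunks _ hpre
  unfold Spec_calc_chunks calc_chunks calc_chunks_alt
  have h1 : 0 < num_chunks := hpre
  have hn : ((num_chunks.toNat : Nat) : Int) = num_chunks := Int.toNat_of_nonneg (by omega)
  have hrem : 0 ≤ PySem.Int.mod nLORs num_chunks := PySem.Int.mod_nonneg nLORs h1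
  rw [← hn]
  exact calc_chunks_loop_inv _ _ (by rw [hn]; exact hrem) num_chunks.toNat
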